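-- pv_equiv track=rewrite | github.com/drewbrew/advent-of-code-2024 | day09.py | lowest_contiguous_free_space_index
-- ===== SOURCE A (Python) =====
-- from typing import Sequence
--
-- def lowest_contiguous_free_space_index(
--     interim_layout: Sequence[int | None], blocks_needed: int, stop_at: int
-- ) -> int | None:
--     for index, value in enumerate(interim_layout):
--         if index >= stop_at:
--             return None
--         if value is not None:
--             continue
--         if interim_layout[index : index + blocks_needed] == [None] * blocks_needed:
--             return index
--     return None
-- ===== SOURCE B (Python) =====
-- def lowest_contiguous_free_space_index(interim_layout, blocks_needed, stop_at):
--     # Single pass tracking the start of the current free run: O(n) instead of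
--     # re-comparing a blocks_needed-long slice at every free index.
--     run_start = None
--     for index, value in enumerate(interim_layout):
--         if value is not None:
--             run_start = None
--             continue
--         if run_start is None:
--             if index >= stop_at:
--                 return None
--             run_start = index
--         if index - run_start + 1 >= blocks_needed:
--             return run_start
--     return None
-- ===== Notes on version B (the rewrite author's own statement) =====
-- stated objective: faster
-- what changed: Replaces the per-index slice comparison against [None]*blocks_needed by a single pass that tracks the start and length of the current free run and returns the first run start that reaches blocks_needed.
-- intended difference: For negative blocks_needed on a list longer than -blocks_needed with a free index before min(stop_at, -blocks_needed), A's slice wraps around Python's negative stop and is non-empty there, so A skips that free index and returns a later index or None; B treats a non-positive need as trivially satisfiable and returns that first free index, the intended value. — e.g. on lowest_contiguous_free_space_index([none, none, none], -2, 10): A returns some 2, B returns some 0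
import Mathlib
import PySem

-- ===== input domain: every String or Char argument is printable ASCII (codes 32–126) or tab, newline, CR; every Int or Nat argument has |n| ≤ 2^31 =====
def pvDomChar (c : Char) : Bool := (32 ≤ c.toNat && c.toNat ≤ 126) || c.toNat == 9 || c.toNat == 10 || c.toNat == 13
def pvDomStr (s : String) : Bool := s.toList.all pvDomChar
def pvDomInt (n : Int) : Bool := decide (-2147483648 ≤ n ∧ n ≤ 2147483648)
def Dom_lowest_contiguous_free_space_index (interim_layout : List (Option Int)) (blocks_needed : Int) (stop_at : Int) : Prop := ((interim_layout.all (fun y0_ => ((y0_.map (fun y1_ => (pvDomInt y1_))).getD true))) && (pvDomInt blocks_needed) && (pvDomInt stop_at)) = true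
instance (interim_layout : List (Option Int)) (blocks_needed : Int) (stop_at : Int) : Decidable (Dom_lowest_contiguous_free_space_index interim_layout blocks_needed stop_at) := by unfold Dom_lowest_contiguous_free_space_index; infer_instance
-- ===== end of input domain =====

-- B replaces A's slice comparison at every free index by a single pass that tracks the start of
-- the current free run (objective: faster, O(n) instead of O(n·blocks_needed)).

-- ===== PORT A =====
-- the enumerate loop of A: recursion over the remaining list carrying the current index;
-- interim_layout[index : index + blocks_needed] is PySem.List.slice, [None]*blocks_needed is
-- List.replicate blocks_needed.toNat none (Python repeats max(0, n) times — exact).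
def pvAgo (full : List (Option Int)) (bn stop : Int) : List (Option Int) → Int → Option Int
  | [], _ => none
  | v :: rest, idx =>
    if stop ≤ idx then none
    else if v.isSome then pvAgo full bn stop rest (idx + 1)
    else if PySem.List.slice full (some idx) (some (idx + bn)) = List.replicate bn.toNat (none : Option Int)
      then some idx
    else pvAgo full bn stop rest (idx + 1)

def lowest_contiguous_free_space_index (interim_layout : List (Option Int)) (blocks_needed : Int) (stop_at : Int) : Option Int :=
  pvAgo interim_layout blocks_needed stop_at interim_layout 0

-- ===== PORT B =====
-- Source B's loop: recursion over the remaining list carrying the index and run_start.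
def pvBgo (bn stop : Int) : List (Option Int) → Int → Option Int → Option Int
  | [], _, _ => none
  | v :: rest, idx, runStart =>
    if v.isSome then pvBgo bn stop rest (idx + 1) none
    else
      match runStart with
      | none =>
        if stop ≤ idx then none
        else
          -- run_start = index; if index - run_start + 1 >= blocks_needed: return run_start
          if bn ≤ idx - idx + 1 then some idx else pvBgo bn stop rest (idx + 1) (some idx)
      | some s =>
        if bn ≤ idx - s + 1 then some s else pvBgo bn stop rest (idx + 1) (some s)

def lowest_contiguous_free_space_index_alt (interim_layout : List (Option Int)) (blocks_needed : Int) (stop_at : Int) : Option Int :=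
  pvBgo blocks_needed stop_at interim_layout 0 none

-- ===== PRECONDITION & SPEC =====
-- For negative blocks_needed (a meaningless request), A's slice wraps around via Python's
-- negative-stop rule and can skip free indices, returning a later index (or None); B treats a
-- non-positive need as trivially satisfiable and returns the first free index before stop_at,
-- which is the intended value.
def D_lowest_contiguous_free_space_index (interim_layout : List (Option Int)) (blocks_needed : Int) (stop_at : Int) : Prop :=
  blocks_needed < 0 ∧ -blocks_needed < (interim_layout.length : Int) ∧
    ∃ i < interim_layout.length, (i : Int) < stop_at ∧ (i : Int) < -blocks_needed ∧ interim_layout.getD i (some 0) = none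
instance (interim_layout : List (Option Int)) (blocks_needed : Int) (stop_at : Int) : Decidable (D_lowest_contiguous_free_space_index interim_layout blocks_needed stop_at) := by unfold D_lowest_contiguous_free_space_index; infer_instance

def Spec_lowest_contiguous_free_space_index (interim_layout : List (Option Int)) (blocks_needed : Int) (stop_at : Int) (out : Option Int) : Prop := ¬ D_lowest_contiguous_free_space_index interim_layout blocks_needed stop_at → out = lowest_contiguous_free_space_index_alt interim_layout blocks_needed stop_at
instance (interim_layout : List (Option Int)) (blocks_needed : Int) (stop_at : Int) (out : Option Int) : Decidable (Spec_lowest_contiguous_free_space_index interim_layout blocks_needed stop_at out) := by unfold Spec_lowest_contiguous_free_space_index; infer_instance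

def pvDiffWitness_lowest_contiguous_free_space_index : List (Option Int) × Int × Int := ([none, none, none], -2, 10)
def pvDiffWitnessOut_lowest_contiguous_free_space_index : (Option Int) × (Option Int) := (some 2, some 0)

-- ===== CLAIM (what is proved, stated in full; the proofs are below) =====
def Claim_unchanged_lowest_contiguous_free_space_index : Prop := ∀ (interim_layout : List (Option Int)) (blocks_needed : Int) (stop_at : Int), Dom_lowest_contiguous_free_space_index interim_layout blocks_needed stop_at → Spec_lowest_contiguous_free_space_index interim_layout blocks_needed stop_at (lowest_contiguous_free_space_index interim_layout blocks_needed stop_at)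
def Claim_exact_lowest_contiguous_free_space_index : Prop := ∀ (interim_layout : List (Option Int)) (blocks_needed : Int) (stop_at : Int), Dom_lowest_contiguous_free_space_index interim_layout blocks_needed stop_at → D_lowest_contiguous_free_space_index interim_layout blocks_needed stop_at → lowest_contiguous_free_space_index interim_layout blocks_needed stop_at ≠ lowest_contiguous_free_space_index_alt interim_layout blocks_needed stop_at
def Claim_changed_lowest_contiguous_free_space_index : Prop := Dom_lowest_contiguous_free_space_index (pvDiffWitness_lowest_contiguous_free_space_index.1) (pvDiffWitness_lowest_contiguous_free_space_index.2.1) (pvDiffWitness_lowest_contiguous_free_space_index.2.2) ∧ D_lowest_contiguous_free_space_index (pvDiffWitness_lowest_contiguous_free_space_index.1) (pvDiffWitness_lowest_contiguous_free_space_index.2.1) (pvDiffWitness_lowest_contiguous_free_space_index.2.2) ∧ lowest_contiguous_free_space_index (pvDiffWitness_lowest_contiguous_free_space_index.1) (pvDiffWitness_lowest_contiguous_free_space_index.2.1) (pvDiffWitness_lowest_contiguous_free_space_index.2.2) = pvDiffWitnessOut_lowest_contiguous_free_space_index.1 ∧ lowest_contiguous_free_space_index_alt (pvDiffWitness_lowest_contiguous_free_space_index.1)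 (pvDiffWitness_lowest_contiguous_free_space_index.2.1) (pvDiffWitness_lowest_contiguous_free_space_index.2.2) = pvDiffWitnessOut_lowest_contiguous_free_space_index.2 ∧ pvDiffWitnessOut_lowest_contiguous_free_space_index.1 ≠ pvDiffWitnessOut_lowest_contiguous_free_space_index.2

-- ===== LEMMAS AND PROOFS =====

-- length of the leading run of `none`s
def pvCntNone : List (Option Int) → Nat
  | [] => 0
  | some _ :: _ => 0
  | none :: rest => pvCntNone rest + 1

theorem pvTake_eq_replicate_iff : ∀ (rest : List (Option Int)) (k : Nat),
    rest.take k = List.replicate k (none : Option Int) ↔ k ≤ pvCntNone rest := by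
  intro rest
  induction rest with
  | nil =>
    intro k
    cases k with
    | zero => simp [pvCntNone]
    | succ m => simp [pvCntNone]
  | cons v rs ih =>
    intro k
    cases k with
    | zero => simp
    | succ m =>
      cases v with
      | some a => simp [pvCntNone, List.replicate_succ]
      | none => simp [pvCntNone, List.replicate_succ, ih m]

-- A's slice for a non-negative need is take ∘ drop
theorem pvSlice_nonneg (full : List (Option Int)) (bn : Int) (hbn : 0 ≤ bn) (j : Nat) :
    PySem.List.slice full (some (j : Int)) (some ((j : Int) + bn)) = (full.drop j).take bn.toNat := by
  have h : (j : Int) + bn = (j : Int) + (bn.toNat : Int) := by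
    rw [Int.toNat_of_nonneg hbn]
  rw [h, PySem.List.slice_natCast_add]

-- A's slice for a negative need is empty, provided need ≤ -length or index ≥ -need
theorem pvSlice_neg_empty (full : List (Option Int)) (bn : Int) (hbn : bn < 0) (j : Nat)
    (h : (full.length : Int) + bn ≤ 0 ∨ -bn ≤ (j : Int)) :
    PySem.List.slice full (some (j : Int)) (some ((j : Int) + bn)) = [] := by
  apply List.eq_nil_of_length_eq_zero
  rw [PySem.List.length_slice]
  by_cases hp : 0 ≤ (j : Int) + bn
  · have h1 : (j : Int) + bn = (((j : Int) + bn).toNat : Int) := (Int.toNat_of_nonneg hp).symm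
    rw [h1, PySem.List.clampIdx_natCast, PySem.List.clampIdx_natCast]
    omega
  · have hn : (j : Int) + bn < 0 := by omega
    have hk : 0 < (-((j : Int) + bn)).toNat := by omega
    have h1 : (j : Int) + bn = -(((-((j : Int) + bn)).toNat : Int)) := by omega
    rw [h1, PySem.List.clampIdx_neg_natCast _ _ hk, PySem.List.clampIdx_natCast]
    omega

-- B, with no active run, returns none once the index has reached stop_at
theorem pvBgo_none_dead (bn stop : Int) : ∀ (rest : List (Option Int)) (idx : Int),
    stop ≤ idx → pvBgo bn stop rest idx none = none := by
  intro rest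
  induction rest with
  | nil => intro idx _; rfl
  | cons v rs ih =>
    intro idx hidx
    cases v with
    | some a => simpa [pvBgo] using ih (idx + 1) (by omega)
    | none => simp [pvBgo, hidx]

-- B, in a run too short to complete, returns none once the index has reached stop_at
theorem pvBgo_run_dead (bn stop : Int) : ∀ (rest : List (Option Int)) (idx s : Int),
    stop ≤ idx → pvCntNone rest < (bn - (idx - s)).toNat → pvBgo bn stop rest idx (some s) = none := by
  intro rest
  induction rest with
  | nil => intro idx s _ _; rfl
  | cons v rs ih =>
    intro idx s hidx hcnt
    cases v with
    | some a => simpa [pvBgo] using pvBgo_none_dead bn stop rs (idx + 1) (by omega)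
    | none =>
      have h1 : pvCntNone rs + 1 < (bn - (idx - s)).toNat := by simpa [pvCntNone] using hcnt
      have hchk : ¬ bn ≤ idx - s + 1 := by omega
      have h2 : pvCntNone rs < (bn - (idx + 1 - s)).toNat := by omega
      simpa [pvBgo, hchk] using ih (idx + 1) s (by omega) h2

-- B, in a run that is long enough to complete, returns the run start
theorem pvBgo_run_win (bn stop : Int) : ∀ (rest : List (Option Int)) (idx s : Int),
    1 ≤ bn - (idx - s) → (bn - (idx - s)).toNat ≤ pvCntNone rest → pvBgo bn stop rest idx (some s) = some s := by
  intro rest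
  induction rest with
  | nil => intro idx s h1 h2; simp [pvCntNone] at h2; omega
  | cons v rs ih =>
    intro idx s h1 h2
    cases v with
    | some a => simp [pvCntNone] at h2; omega
    | none =>
      by_cases hchk : bn ≤ idx - s + 1
      · simp [pvBgo, hchk]
      · have h2' : (bn - (idx - s)).toNat ≤ pvCntNone rs + 1 := by simpa [pvCntNone] using h2
        simpa [pvBgo, hchk] using ih (idx + 1) s (by omega) (by omega)

-- the main invariant for non-negative need: A and B agree from any synchronized state
theorem pvMainPos (full : List (Option Int)) (bn stop : Int) (hbn : 0 ≤ bn) :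
    ∀ n : Nat, ∀ rest : List (Option Int), rest.length = n →
      ((∀ j : Nat, full.drop j = rest →
          pvAgo full bn stop rest (j : Int) = pvBgo bn stop rest (j : Int) none) ∧
       (∀ (j : Nat) (s : Int), full.drop j = rest → s ≤ (j : Int) → 1 ≤ bn - ((j : Int) - s) →
          pvCntNone rest < (bn - ((j : Int) - s)).toNat →
          pvBgo bn stop rest (j : Int) (some s) = pvAgo full bn stop rest (j : Int))) := by
  intro n
  induction n using Nat.strong_induction_on with
  | _ n ih =>
    intro rest hlen
    constructor
    · intro j hdrop
      cases rest with
      | nil => rfl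
      | cons v rs =>
        have hlt : rs.length < n := by rw [← hlen]; simp
        have hdrop' : full.drop (j + 1) = rs := by
          have h := congrArg (List.drop 1) hdrop
          simpa [List.drop_drop, Nat.add_comm] using h
        cases v with
        | some a =>
          by_cases hstop : stop ≤ (j : Int)
          · simp only [pvAgo, pvBgo, if_pos hstop, Option.isSome_some, if_true]
            exact (pvBgo_none_dead bn stop rs _ (by omega)).symm
          · have hmain := (ih rs.length hlt rs rfl).1 (j + 1) hdrop'
            push_cast at hmain
            simpa [pvAgo, pvBgo, hstop] using hmain
        | none =>
          by_cases hstop : stop ≤ (j : Int)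
          · simp [pvAgo, pvBgo, hstop]
          · have hsl := pvSlice_nonneg full bn hbn j
            rw [hdrop] at hsl
            by_cases hb1 : bn ≤ 1
            · have hcond : (none :: rs).take bn.toNat = List.replicate bn.toNat (none : Option Int) := by
                rw [pvTake_eq_replicate_iff]; simp [pvCntNone]; omega
              simp [pvAgo, pvBgo, hstop, hsl, hcond, hb1]
            · have hb2 : ¬ bn ≤ (1 : Int) := hb1
              by_cases hc : bn.toNat ≤ pvCntNone rs + 1
              · have hcond : (none :: rs).take bn.toNat = List.replicate bn.toNat (none : Option Int) := by
                  rw [pvTake_eq_replicate_iff]; simp [pvCntNone]; omega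
                have hwin := pvBgo_run_win bn stop rs ((j : Int) + 1) (j : Int) (by omega) (by omega)
                simp [pvAgo, pvBgo, hstop, hsl, hcond, hb2, hwin]
              · have hcond : ¬ ((none :: rs).take bn.toNat = List.replicate bn.toNat (none : Option Int)) := by
                  rw [pvTake_eq_replicate_iff]; simp [pvCntNone]; omega
                have hrun := (ih rs.length hlt rs rfl).2 (j + 1) (j : Int) hdrop'
                  (by push_cast; omega) (by push_cast; omega) (by push_cast; omega)
                push_cast at hrun
                simp [pvAgo, pvBgo, hstop, hsl, hcond, hb2]
                exact hrun.symm
    · intro j s hdrop hs h1 hcnt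
      cases rest with
      | nil => rfl
      | cons v rs =>
        have hlt : rs.length < n := by rw [← hlen]; simp
        have hdrop' : full.drop (j + 1) = rs := by
          have h := congrArg (List.drop 1) hdrop
          simpa [List.drop_drop, Nat.add_comm] using h
        cases v with
        | some a =>
          by_cases hstop : stop ≤ (j : Int)
          · simp only [pvAgo, pvBgo, if_pos hstop, Option.isSome_some, if_true]
            exact pvBgo_none_dead bn stop rs _ (by omega)
          · have hmain := (ih rs.length hlt rs rfl).1 (j + 1) hdrop'
            push_cast at hmain
            simpa [pvAgo, pvBgo, hstop] using hmain.symm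
        | none =>
          have hcnt' : pvCntNone rs + 1 < (bn - ((j : Int) - s)).toNat := by
            simpa [pvCntNone] using hcnt
          have hchk : ¬ bn ≤ (j : Int) - s + 1 := by omega
          by_cases hstop : stop ≤ (j : Int)
          · have hdead := pvBgo_run_dead bn stop rs ((j : Int) + 1) s (by omega) (by omega)
            simp [pvAgo, pvBgo, hstop, hchk, hdead]
          · have hsl := pvSlice_nonneg full bn hbn j
            rw [hdrop] at hsl
            have hcond : ¬ ((none :: rs).take bn.toNat = List.replicate bn.toNat (none : Option Int)) := by
              rw [pvTake_eq_replicate_iff]; simp [pvCntNone]; omega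
            have hrun := (ih rs.length hlt rs rfl).2 (j + 1) s hdrop'
              (by push_cast; omega) (by push_cast; omega) (by push_cast; omega)
            push_cast at hrun
            simpa [pvAgo, pvBgo, hstop, hchk, hsl, hcond] using hrun

-- negative need, outside D_: every free index A checks has an empty slice, so both return the
-- first free index before stop_at
theorem pvNeg (full : List (Option Int)) (bn stop : Int) (hbn : bn < 0)
    (H : ∀ j : Nat, (j : Int) < stop → (full.drop j).head? = some none →
        PySem.List.slice full (some (j : Int)) (some ((j : Int) + bn)) = []) :
    ∀ rest : List (Option Int), ∀ j : Nat, full.drop j = rest →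
      pvAgo full bn stop rest (j : Int) = pvBgo bn stop rest (j : Int) none := by
  intro rest
  induction rest with
  | nil => intro j _; rfl
  | cons v rs ih =>
    intro j hdrop
    have hdrop' : full.drop (j + 1) = rs := by
      have h := congrArg (List.drop 1) hdrop
      simpa [List.drop_drop, Nat.add_comm] using h
    cases v with
    | some a =>
      by_cases hstop : stop ≤ (j : Int)
      · simp only [pvAgo, pvBgo, if_pos hstop, Option.isSome_some, if_true]
        exact (pvBgo_none_dead bn stop rs _ (by omega)).symm
      · have h := ih (j + 1) hdrop'
        push_cast at h
        simpa [pvAgo, pvBgo, hstop] using h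
    | none =>
      by_cases hstop : stop ≤ (j : Int)
      · simp [pvAgo, pvBgo, hstop]
      · have hhead : (full.drop j).head? = some none := by rw [hdrop]; rfl
        have hsl := H j (by omega) hhead
        have htz : bn.toNat = 0 := by omega
        simp [pvAgo, pvBgo, hstop, hsl, htz]
        intro h1
        exact absurd h1 (by omega)


theorem pvUnchanged (l : List (Option Int)) (bn st : Int)
    (hnd : ¬ D_lowest_contiguous_free_space_index l bn st) :
    lowest_contiguous_free_space_index l bn st =
      lowest_contiguous_free_space_index_alt l bn st := by
  unfold lowest_contiguous_free_space_index lowest_contiguous_free_space_index_alt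
  by_cases hneg : bn < 0
  · have H : ∀ j : Nat, (j : Int) < st → (l.drop j).head? = some none →
        PySem.List.slice l (some (j : Int)) (some ((j : Int) + bn)) = [] := by
      intro j hj hhead
      apply pvSlice_neg_empty l bn hneg j
      by_cases hlen : -bn < (l.length : Int)
      · right
        have hjlen : j < l.length := by
          by_contra hge
          have hnil : l.drop j = [] := List.drop_eq_nil_of_le (by omega)
          rw [hnil] at hhead; simp at hhead
        have hgetD : l.getD j (some 0) = none := by
          have h1 : l[j]? = some (none : Option Int) := by rw [← List.head?_drop]; exact hhead
          rw [List.getD_eq_getElem?_getD, h1]; rfl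
        by_contra hx
        exact hnd ⟨hneg, hlen, j, hjlen, hj, by omega, hgetD⟩
      · left; omega
    have h := pvNeg l bn st hneg H l 0 (by simp)
    simpa using h
  · have h := (pvMainPos l bn st (by omega) l.length l rfl).1 0 (by simp)
    simpa using h


def pvFirstNone : List (Option Int) → Option Nat
  | [] => none
  | none :: _ => some 0
  | some _ :: rest => (pvFirstNone rest).map (· + 1)

theorem pvFirstNone_le : ∀ (l : List (Option Int)) (i : Nat), i < l.length →
    l.getD i (some 0) = none → ∃ t0, pvFirstNone l = some t0 ∧ t0 ≤ i := by
  intro l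
  induction l with
  | nil => intro i hi _; simp at hi
  | cons v rs ih =>
    intro i hi hg
    cases v with
    | none => exact ⟨0, rfl, Nat.zero_le i⟩
    | some a =>
      cases i with
      | zero => simp [List.getD] at hg
      | succ m =>
        have hg' : rs.getD m (some 0) = none := by simpa [List.getD] using hg
        obtain ⟨t0, ht, hle⟩ := ih m (by simpa using hi) hg'
        exact ⟨t0 + 1, by simp [pvFirstNone, ht], by omega⟩

theorem pvBgo_neg_first (bn stop : Int) (hbn : bn ≤ 1) : ∀ (rest : List (Option Int)) (idx : Int),
    pvBgo bn stop rest idx none =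
      (pvFirstNone rest).bind (fun t => if idx + (t : Int) < stop then some (idx + (t : Int)) else none) := by
  intro rest
  induction rest with
  | nil => intro idx; rfl
  | cons v rs ih =>
    intro idx
    cases v with
    | none =>
      by_cases hstop : stop ≤ idx
      · simp [pvBgo, pvFirstNone, hstop]
      · have hchk : bn ≤ idx - idx + 1 := by omega
        simp only [pvBgo, Option.isSome_none, Bool.false_eq_true, if_false, if_neg hstop,
          if_pos hchk, pvFirstNone, Option.bind_some, Nat.cast_zero, add_zero]
        rw [if_pos (by omega : idx < stop)]
    | some a =>
      have h := ih (idx + 1)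
      cases hf : pvFirstNone rs with
      | none => simp [pvBgo, pvFirstNone, hf, h]
      | some t =>
        simp only [pvBgo, Option.isSome_some, if_true, h, hf, pvFirstNone, Option.map_some,
          Option.bind_some]
        have harith : idx + 1 + (t : Int) = idx + ((t : Int) + 1) := by omega
        push_cast
        rw [harith]

theorem pvAgo_sound (full : List (Option Int)) (bn stop : Int) :
    ∀ (rest : List (Option Int)) (idx : Int) (r : Int), pvAgo full bn stop rest idx = some r →
      PySem.List.slice full (some r) (some (r + bn)) = List.replicate bn.toNat (none : Option Int) := by
  intro rest
  induction rest with
  | nil => intro idx r h; simp [pvAgo] at h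
  | cons v rs ih =>
    intro idx r h
    rw [pvAgo] at h
    by_cases hstop : stop ≤ idx
    · simp [hstop] at h
    · rw [if_neg hstop] at h
      cases v with
      | some a => exact ih (idx + 1) r (by simpa using h)
      | none =>
        simp only [Option.isSome_none, Bool.false_eq_true, if_false] at h
        by_cases hc : PySem.List.slice full (some idx) (some (idx + bn)) = List.replicate bn.toNat (none : Option Int)
        · rw [if_pos hc] at h
          obtain rfl : idx = r := by simpa using h
          exact hc
        · exact ih (idx + 1) r (by rwa [if_neg hc] at h)

theorem pvSlice_neg_nonempty (full : List (Option Int)) (bn : Int) (_hbn : bn < 0) (t : Nat)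
    (h1 : (t : Int) < -bn) (h2 : 0 < (full.length : Int) + bn) (h3 : t < full.length) :
    PySem.List.slice full (some (t : Int)) (some ((t : Int) + bn)) ≠ [] := by
  intro h
  have hlen := congrArg List.length h
  rw [PySem.List.length_slice] at hlen
  have hk : 0 < (-((t : Int) + bn)).toNat := by omega
  have he : (t : Int) + bn = -(((-((t : Int) + bn)).toNat : Int)) := by omega
  rw [he, PySem.List.clampIdx_neg_natCast _ _ hk, PySem.List.clampIdx_natCast] at hlen
  simp at hlen
  omega

theorem pvTight (l : List (Option Int)) (bn st : Int)
    (hd : D_lowest_contiguous_free_space_index l bn st) :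
    lowest_contiguous_free_space_index l bn st ≠ lowest_contiguous_free_space_index_alt l bn st := by
  obtain ⟨hbn, hlen, i, hilen, hist, hib, hinone⟩ := hd
  obtain ⟨t0, hf, hle⟩ := pvFirstNone_le l i hilen hinone
  have hB : lowest_contiguous_free_space_index_alt l bn st = some (t0 : Int) := by
    unfold lowest_contiguous_free_space_index_alt
    rw [pvBgo_neg_first bn st (by omega) l 0, hf]
    have hti : ((t0 : Nat) : Int) ≤ (i : Int) := by exact_mod_cast hle
    have hlt : (0 : Int) + (t0 : Int) < st := by omega
    simp only [Option.bind_some, if_pos hlt]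
    norm_num
  intro heq
  rw [hB] at heq
  have hsl := pvAgo_sound l bn st l 0 (t0 : Int) heq
  have htz : bn.toNat = 0 := by omega
  rw [htz, List.replicate_zero] at hsl
  have hti : ((t0 : Nat) : Int) ≤ (i : Int) := by exact_mod_cast hle
  exact pvSlice_neg_nonempty l bn hbn t0 (by omega) (by omega) (by omega) hsl

-- ===== VERDICT (by name: the statement is the Claim_ definition above) =====
theorem lowest_contiguous_free_space_index_spec : Claim_unchanged_lowest_contiguous_free_space_index := by
  intro interim_layout blocks_needed stop_at _ hnd
  exact pvUnchanged interim_layout blocks_needed stop_at hnd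

theorem lowest_contiguous_free_space_index_changed : Claim_changed_lowest_contiguous_free_space_index := by
  unfold Claim_changed_lowest_contiguous_free_space_index; decide

theorem lowest_contiguous_free_space_index_tight : Claim_exact_lowest_contiguous_free_space_index := by
  intro interim_layout blocks_needed stop_at _ hd
  exact pvTight interim_layout blocks_needed stop_at hd
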